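-- pv_equiv track=rewrite | github.com/phbekkum/programming-for-lovers | src/lesson4/main.py | sum_of_maxima
-- ===== SOURCE A (Python) =====
-- def sum_of_maxima(sample1: dict[str, int], sample2: dict[str, int]) -> int:
--     """
--     Compute the sum of corresponding maximum values of two frequency tables.
--     """
--     total = 0
--     all_keys = set(sample1.keys()) | set(sample2.keys())
--     for key in all_keys:
--         v1 = sample1.get(key, 0)
--         v2 = sample2.get(key, 0)
--         total += max2(v1, v2)
--     return total
--
-- def max2(x: int, y: int) -> int:
--     if x > y:
--         return x
--     return y
-- ===== SOURCE B (Python) =====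
-- def max2(x: int, y: int) -> int:
--     if x > y:
--         return x
--     return y
--
-- def sum_of_maxima(sample1: dict[str, int], sample2: dict[str, int]) -> int:
--     """
--     Sum of per-key maxima computed by sorting both item lists and doing a
--     two-pointer merge: no key-union set and no per-key dict lookups at all.
--     """
--     items1 = sorted(sample1.items())
--     items2 = sorted(sample2.items())
--     i, j = 0, 0
--     total = 0
--     while i < len(items1) and j < len(items2):
--         (k1, v1), (k2, v2) = items1[i], items2[j]
--         if k1 < k2:
--             total += max2(v1, 0)
--             i += 1
--         elif k2 < k1:
--             total += max2(0, v2)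
--             j += 1
--         else:
--             total += max2(v1, v2)
--             i += 1
--             j += 1
--     while i < len(items1):
--         total += max2(items1[i][1], 0)
--         i += 1
--     while j < len(items2):
--         total += max2(0, items2[j][1])
--         j += 1
--     return total
-- ===== Notes on version B (the rewrite author's own statement) =====
-- stated objective: alternative
-- what changed: B replaces A's hash-based key-union-and-lookup with a sort-and-merge: both item lists are sorted and a two-pointer merge pairs equal keys, so no union set is built and no dict lookup is performed; Pre_ only excludes association lists with duplicate keys, which do not encode any Python dict.
import Mathlib
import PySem

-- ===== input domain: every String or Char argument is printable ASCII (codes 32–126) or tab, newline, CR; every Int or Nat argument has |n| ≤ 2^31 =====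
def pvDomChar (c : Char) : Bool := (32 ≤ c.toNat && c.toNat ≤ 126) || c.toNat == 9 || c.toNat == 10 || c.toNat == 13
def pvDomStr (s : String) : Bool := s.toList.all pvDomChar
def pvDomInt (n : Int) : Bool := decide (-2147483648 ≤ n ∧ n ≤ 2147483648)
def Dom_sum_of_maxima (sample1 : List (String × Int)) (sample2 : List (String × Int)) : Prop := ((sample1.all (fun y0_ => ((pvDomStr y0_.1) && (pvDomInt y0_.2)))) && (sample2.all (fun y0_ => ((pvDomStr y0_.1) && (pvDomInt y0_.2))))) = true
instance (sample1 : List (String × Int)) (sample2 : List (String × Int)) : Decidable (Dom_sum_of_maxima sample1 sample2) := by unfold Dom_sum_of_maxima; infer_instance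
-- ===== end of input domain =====

-- B replaces A's key-union set plus per-key dict lookups with a sort-and-merge of the
-- two item lists (two-pointer merge on sorted keys); alternative algorithm, same result.

-- ===== PORT A =====
def max2 (x y : Int) : Int := if x > y then x else y

def sum_of_maxima (sample1 : List (String × Int)) (sample2 : List (String × Int)) : Int :=
  -- all_keys = set(sample1.keys()) | set(sample2.keys()); iteration order over the set does not
  -- affect the summed total, so the fold over the PySem.Set's list is exact.
  let allKeys : PySem.Set String :=
    PySem.Set.union (PySem.Set.ofList (sample1.map Prod.fst)) (sample2.map Prod.fst)
  allKeys.foldl (fun total key =>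
    total + max2 ((PySem.Dict.mk sample1).getD key 0) ((PySem.Dict.mk sample2).getD key 0)) 0

-- ===== PORT B =====
-- Source B's merge loop and the two drain loops; the accumulator is `total`, the two list
-- arguments are the unread suffixes items1[i:], items2[j:].
def mergeSum : Int → List (String × Int) → List (String × Int) → Int
  | total, [], [] => total
  | total, [], kv2 :: r2 => mergeSum (total + max2 0 kv2.2) [] r2
  | total, kv1 :: r1, [] => mergeSum (total + max2 kv1.2 0) r1 []
  | total, kv1 :: r1, kv2 :: r2 =>
    if kv1.1 < kv2.1 then mergeSum (total + max2 kv1.2 0) r1 (kv2 :: r2)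
    else if kv2.1 < kv1.1 then mergeSum (total + max2 0 kv2.2) (kv1 :: r1) r2
    else mergeSum (total + max2 kv1.2 kv2.2) r1 r2
  termination_by _ l1 l2 => l1.length + l2.length

def sum_of_maxima_alt (sample1 : List (String × Int)) (sample2 : List (String × Int)) : Int :=
  -- sorted(sample.items()): dict keys are distinct, so Python's tuple sort orders by key.
  mergeSum 0 (PySem.List.sorted sample1 (fun kv => kv.1) false)
             (PySem.List.sorted sample2 (fun kv => kv.1) false)

-- ===== PRECONDITION & SPEC =====
-- Pre_ excludes association lists with duplicate keys: they do not encode a Python dict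
-- (Python collapses duplicates before either function runs), so the list encoding is ambiguous there.
def Pre_sum_of_maxima (sample1 : List (String × Int)) (sample2 : List (String × Int)) : Prop :=
  (sample1.map Prod.fst).Nodup ∧ (sample2.map Prod.fst).Nodup
instance (sample1 : List (String × Int)) (sample2 : List (String × Int)) : Decidable (Pre_sum_of_maxima sample1 sample2) := by unfold Pre_sum_of_maxima; infer_instance

def pvWitness_sum_of_maxima : (List (String × Int)) × (List (String × Int)) :=
  ([("a", 1), ("b", -2)], [("b", 3), ("c", -5)])

def Spec_sum_of_maxima (sample1 : List (String × Int)) (sample2 : List (String × Int)) (out : Int) : Prop := out = sum_of_maxima_alt sample1 sample2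
instance (sample1 : List (String × Int)) (sample2 : List (String × Int)) (out : Int) : Decidable (Spec_sum_of_maxima sample1 sample2 out) := by unfold Spec_sum_of_maxima; infer_instance

-- ===== CLAIM (what is proved, stated in full; the proofs are below) =====
def Claim_equal_sum_of_maxima : Prop := ∀ (sample1 : List (String × Int)) (sample2 : List (String × Int)), Dom_sum_of_maxima sample1 sample2 → Pre_sum_of_maxima sample1 sample2 → Spec_sum_of_maxima sample1 sample2 (sum_of_maxima sample1 sample2)

-- ===== LEMMAS AND PROOFS =====

-- the common value both programs compute: Σ_{(k,v)∈l1} max2 v l2[k] + Σ_{(k,v)∈l2, k∉keys l1} max2 0 v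
def pairSum (l1 l2 : List (String × Int)) : Int :=
  (l1.map (fun kv => max2 kv.2 ((PySem.Dict.mk l2).getD kv.1 0))).sum
  + ((l2.filter (fun kv => !((l1.map Prod.fst).contains kv.1))).map (fun kv => max2 0 kv.2)).sum

-- first-match lookup in a duplicate-free association list finds the stored value
theorem getD_mk_of_mem {k : String} {v : Int} (l : List (String × Int))
    (hnd : (l.map Prod.fst).Nodup) (hm : (k, v) ∈ l) :
    (PySem.Dict.mk l).getD k 0 = v := by
  induction l with
  | nil => cases hm
  | cons p rest ih =>
    obtain ⟨pk, pv⟩ := p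
    simp only [List.map_cons, List.nodup_cons] at hnd
    rcases List.mem_cons.mp hm with h | h
    · rw [Prod.mk.injEq] at h
      simp [PySem.Dict.getD, PySem.Dict.get?_mk_cons, h.1, h.2]
    · have hne : ¬ (pk == k) = true := by
        simp only [beq_iff_eq]
        intro he
        exact hnd.1 (he ▸ (List.mem_map.mpr ⟨(k, v), h, rfl⟩))
      simpa [PySem.Dict.getD, PySem.Dict.get?_mk_cons, hne] using ih hnd.2 h

theorem getD_mk_of_not_mem {k : String} (l : List (String × Int))
    (hm : k ∉ l.map Prod.fst) :
    (PySem.Dict.mk l).getD k 0 = 0 := by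
  induction l with
  | nil => rfl
  | cons p rest ih =>
    obtain ⟨pk, pv⟩ := p
    simp only [List.map_cons, List.mem_cons, not_or] at hm
    have hne : ¬ (pk == k) = true := by
      simp only [beq_iff_eq]; exact fun he => hm.1 he.symm
    simpa [PySem.Dict.getD, PySem.Dict.get?_mk_cons, hne] using ih hm.2

-- lookup is determined by membership once keys are duplicate-free: invariant under permutation
theorem getD_perm {l l' : List (String × Int)} (hp : l.Perm l')
    (hnd : (l.map Prod.fst).Nodup) (k : String) :
    (PySem.Dict.mk l').getD k 0 = (PySem.Dict.mk l).getD k 0 := by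
  have hnd' : (l'.map Prod.fst).Nodup := ((hp.map Prod.fst).nodup_iff).mp hnd
  by_cases hk : k ∈ l.map Prod.fst
  · obtain ⟨kv, hm, he⟩ := List.mem_map.mp hk
    obtain ⟨k', v⟩ := kv
    cases he
    rw [getD_mk_of_mem l hnd hm, getD_mk_of_mem l' hnd' (hp.mem_iff.mp hm)]
  · rw [getD_mk_of_not_mem l hk, getD_mk_of_not_mem l' (fun h => hk ((hp.map Prod.fst).mem_iff.mpr h))]

-- skipping a head entry whose key differs
theorem getD_cons_of_ne {k x : String} {v : Int} {rest : List (String × Int)}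
    (h : ¬ (k == x) = true) :
    (PySem.Dict.mk ((k, v) :: rest)).getD x 0 = (PySem.Dict.mk rest).getD x 0 := by
  simp only [PySem.Dict.getD]
  rw [PySem.Dict.get?_mk_cons, if_neg h]

theorem getD_cons_self {k : String} {v : Int} {rest : List (String × Int)} :
    (PySem.Dict.mk ((k, v) :: rest)).getD k 0 = v := by
  simp only [PySem.Dict.getD]
  rw [PySem.Dict.get?_mk_cons, if_pos (by simp)]
  rfl

-- strictly increasing keys for the sorted item list of a duplicate-free table
theorem sorted_keys_lt (l : List (String × Int)) (hnd : (l.map Prod.fst).Nodup) :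
    (PySem.List.sorted l (fun kv => kv.1) false).Pairwise (fun a b => a.1 < b.1) := by
  have hle := PySem.List.sorted_pairwise (xs := l) (key := fun kv : String × Int => kv.1)
  have hperm : (PySem.List.sorted l (fun kv => kv.1) false).Perm l := PySem.List.sorted_perm _ _ _
  have hnd' : ((PySem.List.sorted l (fun kv => kv.1) false).map Prod.fst).Nodup :=
    ((hperm.map Prod.fst).nodup_iff).mpr hnd
  have hne : (PySem.List.sorted l (fun kv => kv.1) false).Pairwise (fun a b => a.1 ≠ b.1) :=
    (List.pairwise_map.mp (List.nodup_iff_pairwise_ne.mp hnd'))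
  exact (hle.and hne).imp (fun h => lt_of_le_of_ne h.1 h.2)

-- the two-pointer merge computes pairSum on key-sorted inputs
theorem mergeSum_eq (total : Int) (l1 l2 : List (String × Int))
    (h1 : l1.Pairwise (fun a b => a.1 < b.1)) (h2 : l2.Pairwise (fun a b => a.1 < b.1)) :
    mergeSum total l1 l2 = total + pairSum l1 l2 := by
  induction total, l1, l2 using mergeSum.induct with
  | case1 total => simp [mergeSum, pairSum]
  | case2 total kv2 r2 ih =>
    rw [List.pairwise_cons] at h2
    rw [mergeSum, ih List.Pairwise.nil h2.2]
    simp only [pairSum, List.map_nil, List.sum_nil, List.map_cons, List.sum_cons,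
      List.contains_nil, Bool.not_false, List.filter_true]
    ring
  | case3 total kv1 r1 ih =>
    rw [List.pairwise_cons] at h1
    rw [mergeSum, ih h1.2 List.Pairwise.nil]
    simp only [pairSum, List.filter_nil, List.map_nil, List.sum_nil, List.map_cons, List.sum_cons]
    have hz : (PySem.Dict.mk ([] : List (String × Int))).getD kv1.1 0 = 0 := rfl
    rw [hz]
    ring
  | case4 total kv1 r1 kv2 r2 hlt ih =>
    obtain ⟨k2, v2⟩ := kv2
    rw [List.pairwise_cons] at h1
    rw [mergeSum, if_pos hlt, ih h1.2 h2]
    -- kv1's key is smaller than every key of (k2, v2) :: r2, hence absent there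
    have hsmall : ∀ kv ∈ (k2, v2) :: r2, kv1.1 < kv.1 := by
      intro kv hm
      rcases List.mem_cons.mp hm with h | h
      · exact h ▸ hlt
      · exact lt_trans hlt ((List.pairwise_cons.mp h2).1 kv h)
    have hget : (PySem.Dict.mk ((k2, v2) :: r2)).getD kv1.1 0 = 0 := by
      apply getD_mk_of_not_mem
      intro hm
      obtain ⟨kv, hkv, he⟩ := List.mem_map.mp hm
      exact absurd (he ▸ hsmall kv hkv) (lt_irrefl _)
    have hfil : List.filter (fun kv => !((kv1.1 :: List.map Prod.fst r1).contains kv.1)) ((k2, v2) :: r2)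
        = List.filter (fun kv => !((List.map Prod.fst r1).contains kv.1)) ((k2, v2) :: r2) :=
      List.filter_congr (fun kv hm => by
        have hne := ne_of_gt (hsmall kv hm)
        simp [hne])
    simp only [pairSum, List.map_cons, List.sum_cons, hget, hfil]
    ring
  | case5 total kv1 r1 kv2 r2 hnlt hlt ih =>
    obtain ⟨k2, v2⟩ := kv2
    rw [mergeSum, if_neg hnlt, if_pos hlt]
    rw [List.pairwise_cons] at h2
    rw [ih h1 h2.2]
    -- k2 is smaller than kv1's key and every key after it: absent from l1, skipped by l1's lookups
    have hgethead : (PySem.Dict.mk ((k2, v2) :: r2)).getD kv1.1 0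
        = (PySem.Dict.mk r2).getD kv1.1 0 :=
      getD_cons_of_ne (by simp only [beq_iff_eq]; exact ne_of_lt hlt)
    have hmap : List.map (fun kv => max2 kv.2 ((PySem.Dict.mk ((k2, v2) :: r2)).getD kv.1 0)) r1
        = List.map (fun kv => max2 kv.2 ((PySem.Dict.mk r2).getD kv.1 0)) r1 :=
      List.map_congr_left (fun kv hm => by
        rw [getD_cons_of_ne (by
          simp only [beq_iff_eq]
          exact ne_of_lt (lt_trans hlt ((List.pairwise_cons.mp h1).1 kv hm)))])
    have hnotin : ((kv1.1 :: List.map Prod.fst r1).contains k2) = false := by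
      have hmem : k2 ∉ (kv1.1 :: List.map Prod.fst r1) := by
        intro hm
        rcases List.mem_cons.mp hm with h | h
        · exact absurd hlt (by rw [h]; exact lt_irrefl _)
        · obtain ⟨kv, hkv, he⟩ := List.mem_map.mp h
          have := lt_trans hlt ((List.pairwise_cons.mp h1).1 kv hkv)
          exact absurd this (by rw [he]; exact lt_irrefl _)
      simpa [List.contains_eq_mem] using hmem
    simp only [pairSum, List.map_cons, List.sum_cons, List.filter_cons, hgethead, hmap, hnotin,
      Bool.not_false, if_true]
    ring
  | case6 total kv1 r1 kv2 r2 hnlt1 hnlt2 ih =>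
    obtain ⟨k2, v2⟩ := kv2
    rw [mergeSum, if_neg hnlt1, if_neg hnlt2]
    rw [List.pairwise_cons] at h1 h2
    rw [ih h1.2 h2.2]
    have hkeq : kv1.1 = k2 := le_antisymm (not_lt.mp hnlt2) (not_lt.mp hnlt1)
    have hget1 : (PySem.Dict.mk ((k2, v2) :: r2)).getD kv1.1 0 = v2 := by
      rw [hkeq]; exact getD_cons_self
    have hmapr : List.map (fun kv => max2 kv.2 ((PySem.Dict.mk ((k2, v2) :: r2)).getD kv.1 0)) r1
        = List.map (fun kv => max2 kv.2 ((PySem.Dict.mk r2).getD kv.1 0)) r1 :=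
      List.map_congr_left (fun kv hm => by
        rw [getD_cons_of_ne (by
          simp only [beq_iff_eq]
          exact ne_of_lt (hkeq ▸ h1.1 kv hm))])
    have hin : ((kv1.1 :: List.map Prod.fst r1).contains k2) = true := by
      simp [hkeq]
    have hfil : List.filter (fun kv => !((kv1.1 :: List.map Prod.fst r1).contains kv.1)) r2
        = List.filter (fun kv => !((List.map Prod.fst r1).contains kv.1)) r2 :=
      List.filter_congr (fun kv hm => by
        have hne := ne_of_gt (hkeq ▸ h2.1 kv hm)
        simp [hne])
    simp only [pairSum, List.map_cons, List.sum_cons, List.filter_cons, hget1, hmapr, hin,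
      Bool.not_true, Bool.false_eq_true, if_false, hfil]
    ring

-- pairSum is invariant when each table is permuted (keys duplicate-free)
theorem pairSum_perm {l1 l1' l2 l2' : List (String × Int)}
    (p1 : l1.Perm l1') (p2 : l2.Perm l2')
    (_hnd1 : (l1.map Prod.fst).Nodup) (hnd2 : (l2.map Prod.fst).Nodup) :
    pairSum l1' l2' = pairSum l1 l2 := by
  unfold pairSum
  congr 1
  · rw [List.map_congr_left
      (fun (kv : String × Int) (_ : kv ∈ l1') => by rw [getD_perm p2 hnd2 kv.1])]
    exact ((p1.map (fun kv : String × Int =>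
      max2 kv.2 ((PySem.Dict.mk l2).getD kv.1 0))).sum_eq).symm
  · have hcond : ∀ (kv : String × Int),
        (!((l1'.map Prod.fst).contains kv.1)) = (!((l1.map Prod.fst).contains kv.1)) := by
      intro kv
      simp only [List.contains_eq_mem, (p1.map Prod.fst).mem_iff]
    rw [List.filter_congr (fun kv _ => hcond kv)]
    exact (((p2.filter _).map _).sum_eq).symm

-- A computes pairSum
theorem sum_of_maxima_eq_pairSum (s1 s2 : List (String × Int))
    (h1 : (s1.map Prod.fst).Nodup) (h2 : (s2.map Prod.fst).Nodup) :
    sum_of_maxima s1 s2 = pairSum s1 s2 := by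
  unfold sum_of_maxima
  set f : String → Int :=
    fun k => max2 ((PySem.Dict.mk s1).getD k 0) ((PySem.Dict.mk s2).getD k 0) with hf
  have hA : PySem.Set.union (PySem.Set.ofList (s1.map Prod.fst)) (s2.map Prod.fst)
      = s1.map Prod.fst
        ++ (s2.map Prod.fst).filter (fun k => !((s1.map Prod.fst).contains k)) := by
    rw [PySem.Set.ofList_eq_self_of_nodup _ h1]
    show PySem.Set.update (s1.map Prod.fst) (s2.map Prod.fst) = _
    rw [PySem.Set.update_eq_append_filter, PySem.Set.ofList_eq_self_of_nodup _ h2]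
    simp
  rw [hA, PySem.List.foldl_add, List.map_append, List.sum_append]
  have hfirst : (List.map f (s1.map Prod.fst)).sum
      = (List.map (fun kv : String × Int =>
          max2 kv.2 ((PySem.Dict.mk s2).getD kv.1 0)) s1).sum := by
    rw [List.map_map]
    refine congrArg List.sum (List.map_congr_left ?_)
    intro kv hkv
    simp only [Function.comp, hf]
    rw [getD_mk_of_mem s1 h1 hkv]
  have hsecond : (List.map f ((s2.map Prod.fst).filter
        (fun k => !((s1.map Prod.fst).contains k)))).sum
      = (List.map (fun kv : String × Int => max2 0 kv.2)
          (s2.filter (fun kv => !((s1.map Prod.fst).contains kv.1)))).sum := by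
    have hfilter : (s2.map Prod.fst).filter (fun k => !((s1.map Prod.fst).contains k))
        = (s2.filter (fun kv => !((s1.map Prod.fst).contains kv.1))).map Prod.fst := by
      rw [List.filter_map]; rfl
    rw [hfilter, List.map_map]
    refine congrArg List.sum (List.map_congr_left ?_)
    intro kv hkv
    rw [List.mem_filter] at hkv
    have hnotin : kv.1 ∉ s1.map Prod.fst := by
      simpa [List.contains_iff_mem] using hkv.2
    simp only [Function.comp, hf]
    rw [getD_mk_of_not_mem s1 hnotin, getD_mk_of_mem s2 h2 hkv.1]
  rw [hfirst, hsecond]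
  unfold pairSum
  ring

-- ===== VERDICT (by name: the statement is the Claim_ definition above) =====
theorem sum_of_maxima_spec : Claim_equal_sum_of_maxima := by
  intro s1 s2 _dom hpre
  obtain ⟨h1, h2⟩ := hpre
  unfold Spec_sum_of_maxima sum_of_maxima_alt
  have hp1 := PySem.List.sorted_perm s1 (fun kv : String × Int => kv.1) false
  have hp2 := PySem.List.sorted_perm s2 (fun kv : String × Int => kv.1) false
  rw [mergeSum_eq 0 _ _ (sorted_keys_lt s1 h1) (sorted_keys_lt s2 h2), zero_add,
    pairSum_perm hp1.symm hp2.symm h1 h2, sum_of_maxima_eq_pairSum s1 s2 h1 h2]
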